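-- pv_equiv track=rewrite | github.com/Phan-Trung-Thuan/Video2Music | video2music.py | convert_format_id_to_offset
-- ===== SOURCE A (Python) =====
-- def convert_format_id_to_offset(id_list):
--     offset_list = []
--     current_id = id_list[0]
--     offset = 0
--     for i in range(len(id_list)):
--         if id_list[i] != current_id:
--             current_id = id_list[i]
--             offset = 0
--         offset_list.append(offset)
--         offset += 1
--     return offset_list
-- ===== SOURCE B (Python) =====
-- def convert_format_id_to_offset(id_list):
--     # Run-length decomposition: collect maximal runs of equal ids, then
--     # emit range(run_length) per run. Returns [] on empty input.
--     runs = []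
--     for x in id_list:
--         if runs and runs[-1][0] == x:
--             runs[-1][1] += 1
--         else:
--             runs.append([x, 1])
--     return [k for _, n in runs for k in range(n)]
-- ===== Notes on version B (the rewrite author's own statement) =====
-- stated objective: alternative
-- what changed: B first computes a run-length encoding of the list (maximal runs of equal consecutive ids) and then concatenates range(run_length) per run, instead of A's flat index loop carrying a current_id/offset accumulator.
import Mathlib
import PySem

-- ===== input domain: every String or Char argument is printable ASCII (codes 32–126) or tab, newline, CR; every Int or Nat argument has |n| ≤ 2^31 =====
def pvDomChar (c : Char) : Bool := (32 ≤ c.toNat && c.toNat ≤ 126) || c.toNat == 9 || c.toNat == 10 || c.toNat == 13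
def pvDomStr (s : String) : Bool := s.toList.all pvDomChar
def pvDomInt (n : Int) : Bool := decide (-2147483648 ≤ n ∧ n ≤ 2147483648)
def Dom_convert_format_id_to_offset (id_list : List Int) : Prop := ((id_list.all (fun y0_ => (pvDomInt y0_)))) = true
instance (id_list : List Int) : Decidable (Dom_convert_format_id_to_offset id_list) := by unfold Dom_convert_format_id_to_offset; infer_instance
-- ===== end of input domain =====

-- B replaces A's flat loop with a manual current_id/offset accumulator by a
-- run-length encoding pass followed by emitting range(run_length) per run
-- (objective: alternative decomposition; same O(n) cost).

-- ===== PORT A =====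
-- A's for-loop over range(len(id_list)) reads id_list[i] each step; ported as a
-- foldl over the elements with state (current_id, offset, offset_list).
-- One iteration of A's loop body:
def pvStepA (st : Int × Int × List Int) (x : Int) : Int × Int × List Int :=
  let cur := st.1
  let off := st.2.1
  let acc := st.2.2
  if x != cur then (x, 1, acc ++ [0]) else (cur, off + 1, acc ++ [off])

def convert_format_id_to_offset (id_list : List Int) : List Int :=
  match id_list with
  | [] => []  -- unreachable under Pre_: Python raises IndexError at id_list[0]
  | h :: _ => (id_list.foldl pvStepA (h, 0, [])).2.2

-- ===== PORT B =====
-- Source B's first loop: build the run-length encoding (kept head-first, i.e. the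
-- most recent run at the head, mirroring runs[-1]); then reverse and emit
-- range(n) for each run.
-- One iteration of Source B's run-building loop:
def pvStepB (rs : List (Int × Nat)) (x : Int) : List (Int × Nat) :=
  match rs with
  | (v, n) :: rest => if v == x then (v, n + 1) :: rest else (x, 1) :: (v, n) :: rest
  | [] => [(x, 1)]

def convert_format_id_to_offset_alt (id_list : List Int) : List Int :=
  let runs := id_list.foldl pvStepB []
  runs.reverse.flatMap (fun p => (List.range p.2).map (fun k => (k : Int)))

-- ===== PRECONDITION & SPEC =====
-- Pre_ excludes only the empty list, on which Python A raises IndexError.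
def Pre_convert_format_id_to_offset (id_list : List Int) : Prop := id_list ≠ []
instance (id_list : List Int) : Decidable (Pre_convert_format_id_to_offset id_list) := by unfold Pre_convert_format_id_to_offset; infer_instance
def pvWitness_convert_format_id_to_offset : List Int := [5, 5, 7]

def Spec_convert_format_id_to_offset (id_list : List Int) (out : List Int) : Prop := out = convert_format_id_to_offset_alt id_list
instance (id_list : List Int) (out : List Int) : Decidable (Spec_convert_format_id_to_offset id_list out) := by unfold Spec_convert_format_id_to_offset; infer_instance

-- ===== CLAIM (what is proved, stated in full; the proofs are below) =====
def Claim_equal_convert_format_id_to_offset : Prop := ∀ (id_list : List Int), Dom_convert_format_id_to_offset id_list → Pre_convert_format_id_to_offset id_list → Spec_convert_format_id_to_offset id_list (convert_format_id_to_offset id_list)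

-- ===== LEMMAS AND PROOFS =====

-- Reference: the offsets emitted from run-state (current id `cur`, next offset `off`).
def pvOffs (cur off : Int) : List Int → List Int
  | [] => []
  | x :: t => if x == cur then off :: pvOffs cur (off + 1) t else 0 :: pvOffs x 1 t

lemma pvFoldA (l : List Int) (cur off : Int) (acc : List Int) :
    (l.foldl pvStepA (cur, off, acc)).2.2 = acc ++ pvOffs cur off l := by
  induction l generalizing cur off acc with
  | nil => simp [pvOffs]
  | cons x t ih =>
    by_cases h : x == cur
    · rw [List.foldl_cons, show pvStepA (cur, off, acc) x = (cur, off + 1, acc ++ [off]) by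
        simp [pvStepA, bne, h], ih]
      simp [pvOffs, h]
    · rw [List.foldl_cons, show pvStepA (cur, off, acc) x = (x, 1, acc ++ [0]) by
        simp [pvStepA, bne, h], ih]
      simp [pvOffs, h]

def pvFlat (rs : List (Int × Nat)) : List Int :=
  rs.reverse.flatMap (fun p => (List.range p.2).map (fun k => (k : Int)))

lemma pvFoldB (l : List Int) (v : Int) (n : Nat) (rest : List (Int × Nat)) :
    pvFlat (l.foldl pvStepB ((v, n) :: rest)) = pvFlat ((v, n) :: rest) ++ pvOffs v (n : Int) l := by
  induction l generalizing v n rest with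
  | nil => simp [pvOffs]
  | cons x t ih =>
    by_cases h : x == v
    · have hv : v = x := Eq.symm (by simpa using h)
      rw [List.foldl_cons, show pvStepB ((v, n) :: rest) x = (v, n + 1) :: rest by
        simp [pvStepB, hv], ih]
      have hfl : pvFlat ((v, n + 1) :: rest) = pvFlat ((v, n) :: rest) ++ [(n : Int)] := by
        simp [pvFlat, List.range_succ]
      rw [hfl]
      simp only [pvOffs, h, if_pos]
      push_cast
      simp
    · have hv : (v == x) = false := by
        cases hb : v == x
        · rfl
        · exact absurd (by simpa [BEq.comm] using hb) (by simpa using h)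
      rw [List.foldl_cons, show pvStepB ((v, n) :: rest) x = (x, 1) :: (v, n) :: rest by
        simp [pvStepB, hv], ih]
      simp [pvOffs, h, pvFlat]

-- ===== VERDICT (by name: the statement is the Claim_ definition above) =====
theorem convert_format_id_to_offset_spec : Claim_equal_convert_format_id_to_offset := by
  intro id_list _ hpre
  unfold Spec_convert_format_id_to_offset
  match id_list, hpre with
  | h :: t, _ =>
    show (((h :: t).foldl pvStepA (h, 0, [])).2.2 : List Int) = _
    rw [pvFoldA]
    unfold convert_format_id_to_offset_alt
    show _ = pvFlat ((h :: t).foldl pvStepB [])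
    rw [List.foldl_cons, show pvStepB [] h = [(h, 1)] from rfl, pvFoldB]
    simp [pvFlat, pvOffs]
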